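-- pv_equiv track=rewrite | github.com/aurelienizl/ffmpeg-benchmark | src/vaapi_detect.py | parse_vainfo_for_vaapi
-- ===== SOURCE A (Python) =====
-- def parse_vainfo_for_vaapi(vainfo_output):
--     """
--     Analyse la sortie de vainfo et vérifie si H.264 / HEVC encSlice est supporté.
--     Retourne un dictionnaire:
--       {
--         "h264_encode": bool,
--         "h264_decode": bool,
--         "hevc_encode": bool,
--         "hevc_decode": bool
--       }
--     """
--     profiles = {}
--     for line in vainfo_output.split('\n'):
--         line = line.strip()
--         # Example lines:
--         # VAProfileH264Main               : VAEntrypointVLD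
--         # VAProfileH264Main               : VAEntrypointEncSlice
--         # VAProfileHEVCMain               : VAEntrypointEncSlice
--         if line.startswith("VAProfile"):
--             parts = line.split(':')
--             if len(parts) < 2:
--                 continue
--             profile = parts[0].strip()
--             entrypoints = [ep.strip() for ep in parts[1].split(',')]
--             if profile not in profiles:
--                 profiles[profile] = []
--             profiles[profile].extend(entrypoints)
--
--     def has_enc_slice(profile_keys):
--         # If any of these profiles exist with "VAEntrypointEncSlice" or similar
--         # This indicates encode support
--         for prof in profile_keys:
--             if prof in profiles:
--                 for ep in profiles[prof]:
--                     if "EncSlice" in ep or "EncPicture" in ep: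
--                         return True
--         return False
--
--     def has_decode_slice(profile_keys):
--         # If "VAEntrypointVLD" is present
--         for prof in profile_keys:
--             if prof in profiles:
--                 if any("VLD" in ep for ep in profiles[prof]):
--                     return True
--         return False
--
--     # Check for H.264
--     h264_profile_keys = [
--         "VAProfileH264Main",
--         "VAProfileH264High",
--         "VAProfileH264ConstrainedBaseline"
--     ]
--     h264_encode = has_enc_slice(h264_profile_keys)
--     h264_decode = has_decode_slice(h264_profile_keys)
--
--     # Check for HEVC
--     hevc_profile_keys = [
--         "VAProfileHEVCMain",
--         "VAProfileHEVCMain10"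
--     ]
--     hevc_encode = has_enc_slice(hevc_profile_keys)
--     hevc_decode = has_decode_slice(hevc_profile_keys)
--
--     return {
--         "h264_encode": h264_encode,
--         "h264_decode": h264_decode,
--         "hevc_encode": hevc_encode,
--         "hevc_decode": hevc_decode,
--     }
-- ===== SOURCE B (Python) =====
-- H264_KEYS = frozenset((
--     "VAProfileH264Main",
--     "VAProfileH264High",
--     "VAProfileH264ConstrainedBaseline",
-- ))
-- HEVC_KEYS = frozenset((
--     "VAProfileHEVCMain",
--     "VAProfileHEVCMain10",
-- ))
--
--
-- def parse_vainfo_for_vaapi(vainfo_output):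
--     """Single pass over the lines: no intermediate profile dict, just four
--     booleans OR-ed as matching lines are seen."""
--     h264_encode = h264_decode = hevc_encode = hevc_decode = False
--     for raw in vainfo_output.split('\n'):
--         line = raw.strip()
--         if not line.startswith("VAProfile"):
--             continue
--         parts = line.split(':')
--         if len(parts) < 2:
--             continue
--         name = parts[0].strip()
--         if name in H264_KEYS:
--             in_h264, in_hevc = True, False
--         elif name in HEVC_KEYS:
--             in_h264, in_hevc = False, True
--         else:
--             continue
--         eps = [ep.strip() for ep in parts[1].split(',')]
--         enc = any("EncSlice" in ep or "EncPicture" in ep for ep in eps)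
--         dec = any("VLD" in ep for ep in eps)
--         if in_h264:
--             h264_encode |= enc
--             h264_decode |= dec
--         else:
--             hevc_encode |= enc
--             hevc_decode |= dec
--     return {
--         "h264_encode": h264_encode,
--         "h264_decode": h264_decode,
--         "hevc_encode": hevc_encode,
--         "hevc_decode": hevc_decode,
--     }
-- ===== Notes on version B (the rewrite author's own statement) =====
-- stated objective: simpler
-- what changed: Eliminates the intermediate profile->entrypoints dict and the two helper functions that re-scan it per key list; B keeps just four booleans and ORs them in a single pass over the lines.
import Mathlib
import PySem

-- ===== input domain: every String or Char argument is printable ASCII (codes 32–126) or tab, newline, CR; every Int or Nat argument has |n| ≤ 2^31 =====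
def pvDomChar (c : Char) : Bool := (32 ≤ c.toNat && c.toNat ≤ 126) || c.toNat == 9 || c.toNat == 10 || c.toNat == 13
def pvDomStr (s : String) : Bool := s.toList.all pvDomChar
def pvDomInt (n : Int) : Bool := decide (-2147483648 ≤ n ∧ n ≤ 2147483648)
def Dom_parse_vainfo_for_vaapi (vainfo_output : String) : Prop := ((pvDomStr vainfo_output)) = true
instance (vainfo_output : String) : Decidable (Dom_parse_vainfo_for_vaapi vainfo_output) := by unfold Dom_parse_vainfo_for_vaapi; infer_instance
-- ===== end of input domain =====

-- B replaces A's intermediate profile→entrypoints dict (and its two helper re-scans) by a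
-- single pass over the lines that ORs four booleans directly; objective: simpler.

-- ===== PORT A =====
def pvA_h264_profile_keys : List (List Char) :=
  ["VAProfileH264Main".toList, "VAProfileH264High".toList, "VAProfileH264ConstrainedBaseline".toList]

def pvA_hevc_profile_keys : List (List Char) :=
  ["VAProfileHEVCMain".toList, "VAProfileHEVCMain10".toList]

-- body of A's 'for line in vainfo_output.split('\n')' loop
def pvA_step (profiles : PySem.Dict (List Char) (List (List Char))) (raw : List Char) :
    PySem.Dict (List Char) (List (List Char)) :=
  let line := PySem.Chars.strip raw
  if PySem.Chars.startswith line "VAProfile".toList then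
    let parts := PySem.Chars.splitOn line ":".toList
    if parts.length < 2 then profiles
    else
      let profile := PySem.Chars.strip (parts.getD 0 [])
      let entrypoints := (PySem.Chars.splitOn (parts.getD 1 []) ",".toList).map PySem.Chars.strip
      -- 'if profile not in profiles: profiles[profile] = []' is setdefault; '.extend' is modify ++
      let profiles := profiles.setdefault profile []
      profiles.modify profile [] (fun v => v ++ entrypoints)
  else profiles

def pvA_has_enc_slice (profiles : PySem.Dict (List Char) (List (List Char)))
    (profile_keys : List (List Char)) : Bool :=
  profile_keys.any (fun prof =>
    profiles.contains prof &&
      (profiles.getD prof []).any (fun ep =>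
        PySem.Chars.isIn "EncSlice".toList ep || PySem.Chars.isIn "EncPicture".toList ep))

def pvA_has_decode_slice (profiles : PySem.Dict (List Char) (List (List Char)))
    (profile_keys : List (List Char)) : Bool :=
  profile_keys.any (fun prof =>
    profiles.contains prof &&
      (profiles.getD prof []).any (fun ep => PySem.Chars.isIn "VLD".toList ep))

def parse_vainfo_for_vaapi (vainfo_output : String) : List (String × Bool) :=
  let profiles :=
    (PySem.Chars.splitOn vainfo_output.toList "\n".toList).foldl pvA_step PySem.Dict.empty
  [("h264_encode", pvA_has_enc_slice profiles pvA_h264_profile_keys),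
   ("h264_decode", pvA_has_decode_slice profiles pvA_h264_profile_keys),
   ("hevc_encode", pvA_has_enc_slice profiles pvA_hevc_profile_keys),
   ("hevc_decode", pvA_has_decode_slice profiles pvA_hevc_profile_keys)]

-- ===== PORT B =====
def pvB_H264_KEYS : List (List Char) :=
  ["VAProfileH264Main".toList, "VAProfileH264High".toList, "VAProfileH264ConstrainedBaseline".toList]

def pvB_HEVC_KEYS : List (List Char) :=
  ["VAProfileHEVCMain".toList, "VAProfileHEVCMain10".toList]

-- flags = ((h264_encode, h264_decode), (hevc_encode, hevc_decode)); body of B's single loop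
def pvB_step (flags : (Bool × Bool) × (Bool × Bool)) (raw : List Char) :
    (Bool × Bool) × (Bool × Bool) :=
  let line := PySem.Chars.strip raw
  if PySem.Chars.startswith line "VAProfile".toList then
    let parts := PySem.Chars.splitOn line ":".toList
    if parts.length < 2 then flags
    else
      let name := PySem.Chars.strip (parts.getD 0 [])
      -- 'if name in H264: …; elif name in HEVC: …; else: continue'
      match (if pvB_H264_KEYS.contains name then some true
             else if pvB_HEVC_KEYS.contains name then some false
             else none) with
      | none => flags
      | some in_h264 =>
        let eps := (PySem.Chars.splitOn (parts.getD 1 []) ",".toList).map PySem.Chars.strip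
        let enc := eps.any (fun ep =>
          PySem.Chars.isIn "EncSlice".toList ep || PySem.Chars.isIn "EncPicture".toList ep)
        let dec := eps.any (fun ep => PySem.Chars.isIn "VLD".toList ep)
        if in_h264 then ((flags.1.1 || enc, flags.1.2 || dec), flags.2)
        else (flags.1, (flags.2.1 || enc, flags.2.2 || dec))
  else flags

def parse_vainfo_for_vaapi_alt (vainfo_output : String) : List (String × Bool) :=
  let flags :=
    (PySem.Chars.splitOn vainfo_output.toList "\n".toList).foldl pvB_step
      ((false, false), (false, false))
  [("h264_encode", flags.1.1), ("h264_decode", flags.1.2),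
   ("hevc_encode", flags.2.1), ("hevc_decode", flags.2.2)]

-- ===== PRECONDITION & SPEC =====
def Spec_parse_vainfo_for_vaapi (vainfo_output : String) (out : List (String × Bool)) : Prop := out = parse_vainfo_for_vaapi_alt vainfo_output
instance (vainfo_output : String) (out : List (String × Bool)) : Decidable (Spec_parse_vainfo_for_vaapi vainfo_output out) := by unfold Spec_parse_vainfo_for_vaapi; infer_instance

-- ===== CLAIM (what is proved, stated in full; the proofs are below) =====
def Claim_equal_parse_vainfo_for_vaapi : Prop := ∀ (vainfo_output : String), Dom_parse_vainfo_for_vaapi vainfo_output → Spec_parse_vainfo_for_vaapi vainfo_output (parse_vainfo_for_vaapi vainfo_output)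

-- ===== LEMMAS AND PROOFS =====

-- the (name, entrypoints) a line contributes, or none if the line is skipped
def pvParse (raw : List Char) : Option (List Char × List (List Char)) :=
  let line := PySem.Chars.strip raw
  if PySem.Chars.startswith line "VAProfile".toList then
    let parts := PySem.Chars.splitOn line ":".toList
    if parts.length < 2 then none
    else some (PySem.Chars.strip (parts.getD 0 []),
               (PySem.Chars.splitOn (parts.getD 1 []) ",".toList).map PySem.Chars.strip)
  else none

def pvEnc (ep : List Char) : Bool :=
  PySem.Chars.isIn "EncSlice".toList ep || PySem.Chars.isIn "EncPicture".toList ep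

def pvDec (ep : List Char) : Bool := PySem.Chars.isIn "VLD".toList ep

-- the entrypoints a line contributes under a given profile key
def pvEntriesOf (prof : List Char) (raw : List Char) : List (List Char) :=
  match pvParse raw with
  | some (n, eps) => if prof = n then eps else []
  | none => []

def pvNames (prof : List Char) (raw : List Char) : Bool :=
  match pvParse raw with
  | some (n, _) => prof == n
  | none => false

-- B's per-line contribution to one of the four flags
def pvFlagOf (K : List (List Char)) (p : List Char → Bool) (raw : List Char) : Bool :=
  match pvParse raw with
  | some (n, eps) => K.contains n && eps.any p
  | none => false

theorem pvDisjoint {n : List Char} (h : n ∈ pvB_H264_KEYS) : n ∉ pvB_HEVC_KEYS := by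
  simp only [pvB_H264_KEYS, List.mem_cons, List.not_mem_nil, or_false] at h
  rcases h with h | h | h <;> subst h <;> decide

theorem pvA_step_eq (d : PySem.Dict (List Char) (List (List Char))) (raw : List Char) :
    pvA_step d raw = match pvParse raw with
      | some (n, eps) => (d.setdefault n []).modify n [] (fun v => v ++ eps)
      | none => d := by
  unfold pvA_step pvParse
  dsimp only
  split_ifs <;> rfl

theorem pvB_step_eq (fl : (Bool × Bool) × (Bool × Bool)) (raw : List Char) :
    pvB_step fl raw =
      ((fl.1.1 || pvFlagOf pvB_H264_KEYS pvEnc raw, fl.1.2 || pvFlagOf pvB_H264_KEYS pvDec raw),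
       (fl.2.1 || pvFlagOf pvB_HEVC_KEYS pvEnc raw, fl.2.2 || pvFlagOf pvB_HEVC_KEYS pvDec raw)) := by
  unfold pvB_step pvFlagOf pvParse pvEnc pvDec
  dsimp only
  split_ifs with h1 h2 h3 h4 <;> try simp_all
  all_goals (have := pvDisjoint h3; simp_all)

theorem pvFold_getD (lines : List (List Char)) (prof : List Char) :
    ∀ d : PySem.Dict (List Char) (List (List Char)),
      (lines.foldl pvA_step d).getD prof [] = d.getD prof [] ++ lines.flatMap (pvEntriesOf prof) := by
  induction lines with
  | nil => intro d; simp
  | cons raw rest ih =>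
    intro d
    rw [List.foldl_cons, ih, pvA_step_eq]
    cases hp : pvParse raw with
    | none => simp [pvEntriesOf, hp]
    | some pr =>
      obtain ⟨n, eps⟩ := pr
      simp only [pvEntriesOf, hp, List.flatMap_cons]
      by_cases h : prof = n
      · subst h
        rw [PySem.Dict.getD_modify_self, PySem.Dict.getD_setdefault_self]
        simp [List.append_assoc]
      · rw [PySem.Dict.getD_modify]
        simp only [h, if_false]
        rw [PySem.Dict.getD_eq_get?_getD, PySem.Dict.get?_setdefault_of_ne _ _ h,
            ← PySem.Dict.getD_eq_get?_getD]
        simp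

theorem pvFold_contains (lines : List (List Char)) (prof : List Char) :
    ∀ d : PySem.Dict (List Char) (List (List Char)),
      (lines.foldl pvA_step d).contains prof = (d.contains prof || lines.any (pvNames prof)) := by
  induction lines with
  | nil => intro d; simp
  | cons raw rest ih =>
    intro d
    rw [List.foldl_cons, ih, pvA_step_eq]
    cases hp : pvParse raw with
    | none => simp [pvNames, hp]
    | some pr =>
      obtain ⟨n, eps⟩ := pr
      rw [PySem.Dict.contains_modify, PySem.Dict.contains_setdefault]
      simp only [pvNames, hp, List.any_cons]
      cases hn : (prof == n) <;> cases d.contains prof <;> simp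

theorem pvA_side (lines : List (List Char)) (K : List (List Char)) (p : List Char → Bool) :
    (K.any (fun prof =>
      (lines.foldl pvA_step PySem.Dict.empty).contains prof &&
        ((lines.foldl pvA_step PySem.Dict.empty).getD prof []).any p))
    = lines.any (pvFlagOf K p) := by
  rw [Bool.eq_iff_iff]
  constructor
  · intro h
    simp only [List.any_eq_true, Bool.and_eq_true] at h
    obtain ⟨prof, hK, _, hany⟩ := h
    rw [pvFold_getD] at hany
    simp only [PySem.Dict.getD_empty, List.nil_append, List.mem_flatMap] at hany
    obtain ⟨ep, ⟨raw, hraw, hepraw⟩, hp⟩ := hany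
    unfold pvEntriesOf at hepraw
    rw [List.any_eq_true]
    refine ⟨raw, hraw, ?_⟩
    unfold pvFlagOf
    cases hpp : pvParse raw with
    | none => rw [hpp] at hepraw; simp at hepraw
    | some pr =>
      obtain ⟨n, eps⟩ := pr
      rw [hpp] at hepraw
      by_cases hpn : prof = n
      · subst hpn
        simp only at hepraw
        simp only [Bool.and_eq_true, List.any_eq_true]
        exact ⟨by simpa using hK, ep, hepraw, hp⟩
      · simp [hpn] at hepraw
  · intro h
    simp only [List.any_eq_true] at h
    obtain ⟨raw, hraw, hflag⟩ := h
    unfold pvFlagOf at hflag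
    cases hpp : pvParse raw with
    | none => rw [hpp] at hflag; simp at hflag
    | some pr =>
      obtain ⟨n, eps⟩ := pr
      rw [hpp] at hflag
      simp only [Bool.and_eq_true, List.any_eq_true] at hflag
      obtain ⟨hKn, ep, hep, hp⟩ := hflag
      simp only [List.any_eq_true, Bool.and_eq_true]
      refine ⟨n, by simpa using hKn, ?_, ?_⟩
      · rw [pvFold_contains]
        simp only [PySem.Dict.contains_empty, Bool.false_or, List.any_eq_true]
        exact ⟨raw, hraw, by simp [pvNames, hpp]⟩
      · rw [pvFold_getD]
        simp only [PySem.Dict.getD_empty, List.nil_append, List.mem_flatMap]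
        exact ⟨ep, ⟨raw, hraw, by simpa [pvEntriesOf, hpp] using hep⟩, hp⟩

theorem pvB_side (lines : List (List Char)) :
    lines.foldl pvB_step ((false, false), (false, false)) =
      ((lines.any (pvFlagOf pvB_H264_KEYS pvEnc), lines.any (pvFlagOf pvB_H264_KEYS pvDec)),
       (lines.any (pvFlagOf pvB_HEVC_KEYS pvEnc), lines.any (pvFlagOf pvB_HEVC_KEYS pvDec))) := by
  have gen : ∀ (ls : List (List Char)) (fl : (Bool × Bool) × (Bool × Bool)),
      ls.foldl pvB_step fl =
        ((fl.1.1 || ls.any (pvFlagOf pvB_H264_KEYS pvEnc), fl.1.2 || ls.any (pvFlagOf pvB_H264_KEYS pvDec)),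
         (fl.2.1 || ls.any (pvFlagOf pvB_HEVC_KEYS pvEnc), fl.2.2 || ls.any (pvFlagOf pvB_HEVC_KEYS pvDec))) := by
    intro ls
    induction ls with
    | nil => intro fl; simp
    | cons raw rest ih =>
      intro fl
      rw [List.foldl_cons, ih, pvB_step_eq]
      simp [Bool.or_assoc]
  rw [gen]
  simp

-- ===== VERDICT (by name: the statement is the Claim_ definition above) =====
theorem parse_vainfo_for_vaapi_spec : Claim_equal_parse_vainfo_for_vaapi := by
  intro s _
  unfold Spec_parse_vainfo_for_vaapi parse_vainfo_for_vaapi parse_vainfo_for_vaapi_alt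
  rw [pvB_side]
  have hA : pvA_h264_profile_keys = pvB_H264_KEYS := rfl
  have hB : pvA_hevc_profile_keys = pvB_HEVC_KEYS := rfl
  simp only [pvA_has_enc_slice, pvA_has_decode_slice, hA, hB]
  rw [pvA_side _ _ _, pvA_side _ _ _, pvA_side _ _ _, pvA_side _ _ _]
  rfl
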